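-- pv_equiv track=rewrite | github.com/skvndyk/AdventOfCode | 2016/day7-2016.py | abaTest
-- ===== SOURCE A (Python) =====
-- def abaTest(to_test):
--     candidate_abas = []
--     for y in range(len(to_test)):
--         x = 0
--         string_length = len(to_test[y])
--         while x < (string_length - 2):
--             test_string = to_test[y][x:x + 3]
--             if (test_string[0] == test_string[2]) and (test_string[0] != test_string[1]):
--                 candidate_abas.append(test_string)
--             x += 1
--     return candidate_abas
-- ===== SOURCE B (Python) =====
-- def abaTest(to_test):
--     # B: per string, build a char -> positions index, find ABA starts per character
--     # class via set membership of i+2, then sort the starts and slice the triplets.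
--     candidate_abas = []
--     for s in to_test:
--         index = {}
--         for i, ch in enumerate(s):
--             index.setdefault(ch, []).append(i)
--         starts = []
--         for ch, positions in index.items():
--             pos_set = set(positions)
--             for i in positions:
--                 if i + 2 in pos_set and s[i + 1] != ch:
--                     starts.append(i)
--         starts.sort()
--         candidate_abas.extend(s[i:i + 3] for i in starts)
--     return candidate_abas
-- ===== Notes on version B (the rewrite author's own statement) =====
-- stated objective: alternative
-- what changed: Instead of sliding a 3-char window, B groups each string's positions by character into a dict, detects ABA starts per character class via set membership of i+2 (with the middle-char inequality check), then sorts the collected starts and slices the triplets, which restores A's left-to-right order.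
import Mathlib
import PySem

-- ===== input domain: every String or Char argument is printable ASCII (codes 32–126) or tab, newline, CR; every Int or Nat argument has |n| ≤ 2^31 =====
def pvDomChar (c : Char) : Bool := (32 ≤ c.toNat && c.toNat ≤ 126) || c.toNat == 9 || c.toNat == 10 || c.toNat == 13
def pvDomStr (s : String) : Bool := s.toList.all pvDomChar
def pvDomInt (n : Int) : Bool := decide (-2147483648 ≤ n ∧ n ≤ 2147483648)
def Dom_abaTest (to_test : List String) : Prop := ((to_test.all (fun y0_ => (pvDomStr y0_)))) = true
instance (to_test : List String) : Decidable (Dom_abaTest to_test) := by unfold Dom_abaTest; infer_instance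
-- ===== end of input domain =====

-- B replaces A's sliding 3-char window with a per-character position index (dict),
-- detecting ABA starts per character class via set membership of i+2, then sorting
-- the starts back into left-to-right order (alternative algorithm, same results).

-- ===== PORT A =====
-- inner while loop of A: x counts up while x < len(s) - 2; the 3-char slice is always
-- fully in range there, so the string indexing t[0]/t[1]/t[2] is ported as pyGet?
-- (never none on reachable inputs).
def abaLoopA (s : List Char) (x : Int) (acc : List String) : List String :=
  if _h : x < (s.length : Int) - 2 then
    let t := PySem.List.slice s (some x) (some (x + 3))
    let acc' :=
      if PySem.List.pyGet? t 0 = PySem.List.pyGet? t 2 ∧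
         ¬ (PySem.List.pyGet? t 0 = PySem.List.pyGet? t 1) then
        acc ++ [String.ofList t]
      else acc
    abaLoopA s (x + 1) acc'
  else acc
termination_by ((s.length : Int) - 2 - x).toNat
decreasing_by omega

def abaTest (to_test : List String) : List String :=
  (PySem.List.pyRange 0 to_test.length 1).foldl
    (fun acc y => abaLoopA (PySem.List.pyGetD to_test y "").toList 0 acc) []

-- ===== PORT B =====
-- index = {}; for i, ch in enumerate(s): index.setdefault(ch, []).append(i)
def abaIndex (cs : List Char) : PySem.Dict Char (List Int) :=
  (PySem.List.enumerate cs).foldl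
    (fun d p => d.modify p.2 [] (fun l => l ++ [p.1])) PySem.Dict.empty

-- for ch, positions in index.items(): pos_set = set(positions);
--   for i in positions: if i+2 in pos_set and s[i+1] != ch: starts.append(i)
-- (s[i+1] is in range whenever i+2 is a position of s, so it is ported as pyGetD)
def abaStarts (cs : List Char) : List Int :=
  (abaIndex cs).items.foldl
    (fun acc p =>
      p.2.foldl (fun acc i =>
        if (PySem.Set.ofList p.2).contains (i + 2) &&
           (PySem.List.pyGetD cs (i + 1) ' ' != p.1)
        then acc ++ [i] else acc) acc) []

def abaTest_alt (to_test : List String) : List String :=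
  to_test.foldl
    (fun acc s =>
      acc ++ (PySem.List.sorted (abaStarts s.toList) (fun x => x)).map
        (fun i => String.ofList (PySem.List.slice s.toList (some i) (some (i + 3))))) []

-- ===== PRECONDITION & SPEC =====
def Spec_abaTest (to_test : List String) (out : List String) : Prop := out = abaTest_alt to_test
instance (to_test : List String) (out : List String) : Decidable (Spec_abaTest to_test out) := by unfold Spec_abaTest; infer_instance

-- ===== CLAIM (what is proved, stated in full; the proofs are below) =====
def Claim_equal_abaTest : Prop := ∀ (to_test : List String), Dom_abaTest to_test → Spec_abaTest to_test (abaTest to_test)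

-- ===== LEMMAS AND PROOFS =====

-- the ABA test at window start i, expressed through total indexing
def abaGood (cs : List Char) (i : Int) : Bool :=
  decide (PySem.List.pyGetD cs i ' ' = PySem.List.pyGetD cs (i + 2) ' ') &&
  !(decide (PySem.List.pyGetD cs i ' ' = PySem.List.pyGetD cs (i + 1) ' '))

-- the list of ABA window starts, as a filter of the full index range
def abaWin (cs : List Char) : List Int :=
  (PySem.List.pyRange 0 ((cs.length : Int))).filter
    (fun i => decide (i < (cs.length : Int) - 2) && abaGood cs i)

def abaTrip (cs : List Char) (i : Int) : String :=
  String.ofList (PySem.List.slice cs (some i) (some (i + 3)))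

theorem pyRange_one_nil {a b : Int} (h : b ≤ a) : PySem.List.pyRange a b = [] := by
  apply List.eq_nil_iff_forall_not_mem.mpr
  intro x hx
  rw [PySem.List.mem_pyRange_one] at hx
  omega

theorem pyRange_one_pairwise (a b : Int) :
    (PySem.List.pyRange a b).Pairwise (· < ·) := by
  by_cases h : a < b
  · rw [PySem.List.pyRange_one_cons h]
    refine List.Pairwise.cons ?_ (pyRange_one_pairwise (a + 1) b)
    intro x hx
    rw [PySem.List.mem_pyRange_one] at hx
    omega
  · rw [pyRange_one_nil (by omega)]
    exact List.Pairwise.nil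
termination_by (b - a).toNat
decreasing_by omega

theorem pyRange_filter_lt (a b c : Int) (h : b ≤ c) :
    PySem.List.pyRange a b = (PySem.List.pyRange a c).filter (fun i => decide (i < b)) := by
  by_cases hac : a < c
  · rw [PySem.List.pyRange_one_cons hac, List.filter_cons]
    by_cases hab : a < b
    · rw [PySem.List.pyRange_one_cons hab]
      simp only [hab, decide_true, if_true]
      rw [pyRange_filter_lt (a + 1) b c h]
    · rw [← pyRange_filter_lt (a + 1) b c h]
      simp [hab, pyRange_one_nil (show b ≤ a by omega),
        pyRange_one_nil (show b ≤ a + 1 by omega)]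
  · rw [pyRange_one_nil (by omega), pyRange_one_nil (le_of_not_gt hac)]
    rfl
termination_by (c - a).toNat
decreasing_by all_goals omega

-- general: concatenating, over distinct class representatives covering xs, the
-- elements of xs in each class is a permutation of xs
theorem perm_flatMap_classes {α κ : Type} [BEq κ] [LawfulBEq κ]
    (reps : List κ) (xs : List α) (key : α → κ) (hnd : reps.Nodup)
    (hcov : ∀ x ∈ xs, key x ∈ reps) :
    (reps.flatMap (fun r => xs.filter (fun x => key x == r))).Perm xs := by
  induction reps generalizing xs with
  | nil =>
    have hxs : xs = [] := List.eq_nil_iff_forall_not_mem.mpr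
      (fun x hx => by simpa using hcov x hx)
    simp [hxs]
  | cons r rest ih =>
    rw [List.flatMap_cons]
    have hrnot : r ∉ rest := (List.nodup_cons.mp hnd).1
    have hrw : rest.flatMap (fun r' => xs.filter (fun x => key x == r')) =
        rest.flatMap (fun r' =>
          (xs.filter (fun x => !(key x == r))).filter (fun x => key x == r')) := by
      apply List.flatMap_congr
      intro r' hr'
      rw [List.filter_filter]
      apply List.filter_congr
      intro x _
      by_cases hk : key x = r'
      · have hrr : r' ≠ r := fun he => hrnot (he ▸ hr')
        simp [hk, hrr]
      · simp [hk]
    rw [hrw]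
    have ihp := ih (xs.filter (fun x => !(key x == r)))
      (List.nodup_cons.mp hnd).2
      (by
        intro x hx
        rw [List.mem_filter] at hx
        have := hcov x hx.1
        rcases List.mem_cons.mp this with he | hm
        · exfalso; simp [he] at hx
        · exact hm)
    exact (List.Perm.append_left _ ihp).trans (List.filter_append_perm _ xs)

-- ===== A-side characterization =====

theorem abaLoopA_eq (s : List Char) (x : Nat) (acc : List String) :
    abaLoopA s (x : Int) acc =
      acc ++ ((PySem.List.pyRange (x : Int) ((s.length : Int) - 2)).filter
        (abaGood s)).map (abaTrip s) := by
  by_cases h : x + 2 < s.length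
  · have hdl : 3 ≤ (s.drop x).length := by simp; omega
    obtain ⟨a, b, c, l3, hd⟩ : ∃ a b c l3, s.drop x = a :: b :: c :: l3 := by
      rcases hdd : s.drop x with _ | ⟨a, _ | ⟨b, _ | ⟨c, l3⟩⟩⟩ <;>
        first
        | exact ⟨a, b, c, l3, rfl⟩
        | (rw [hdd] at hdl; simp at hdl)
    have hslice : PySem.List.slice s (some (x : Int)) (some ((x : Int) + 3)) = [a, b, c] := by
      have h3' := PySem.List.slice_natCast_add s x 3
      norm_num at h3'
      rw [h3', hd]; simp
    have hget : ∀ (k : Nat), s.getD (x + k) ' ' = (s.drop x).getD k ' ' := by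
      intro k; simp [List.getD_eq_getElem?_getD, List.getElem?_drop]
    have hg0 : PySem.List.pyGetD s ((x : Int)) ' ' = a := by
      rw [PySem.List.pyGetD_natCast, show x = x + 0 from rfl, hget 0, hd]
      rfl
    have hg1 : PySem.List.pyGetD s ((x : Int) + 1) ' ' = b := by
      rw [show ((x : Int) + 1) = ((x + 1 : Nat) : Int) by push_cast; ring,
        PySem.List.pyGetD_natCast, hget 1, hd]
      rfl
    have hg2 : PySem.List.pyGetD s ((x : Int) + 2) ' ' = c := by
      rw [show ((x : Int) + 2) = ((x + 2 : Nat) : Int) by push_cast; ring,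
        PySem.List.pyGetD_natCast, hget 2, hd]
      rfl
    rw [abaLoopA]
    have hcond : (x : Int) < (s.length : Int) - 2 := by omega
    rw [dif_pos hcond, hslice]
    rw [PySem.List.pyRange_one_cons hcond, List.filter_cons]
    have hgood : abaGood s (x : Int) = decide (a = c ∧ ¬ a = b) := by
      simp only [abaGood, hg0, hg1, hg2]
      by_cases h1 : a = c <;> by_cases h2 : a = b <;> simp [h1, h2]
    have hA : (PySem.List.pyGet? [a, b, c] 0 = PySem.List.pyGet? [a, b, c] 2 ∧
        ¬ (PySem.List.pyGet? [a, b, c] 0 = PySem.List.pyGet? [a, b, c] 1)) ↔ (a = c ∧ ¬ a = b) := by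
      simp [PySem.List.pyGet?, PySem.List.pyIdx?]
    have hx1 : ((x : Int) + 1) = (((x + 1 : Nat)) : Int) := by push_cast; ring
    show abaLoopA s ((x : Int) + 1)
        (if PySem.List.pyGet? [a, b, c] 0 = PySem.List.pyGet? [a, b, c] 2 ∧
            ¬ (PySem.List.pyGet? [a, b, c] 0 = PySem.List.pyGet? [a, b, c] 1)
         then acc ++ [String.ofList [a, b, c]] else acc) = _
    rw [hx1, abaLoopA_eq s (x + 1)]
    have htrip : abaTrip s ((x : Int)) = String.ofList [a, b, c] := by
      unfold abaTrip; rw [hslice]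
    by_cases hab : a = c ∧ ¬ a = b
    · rw [if_pos (hA.mpr hab)]
      have hgT : abaGood s ((x : Int)) = true := by rw [hgood]; exact decide_eq_true hab
      rw [hgT, if_pos rfl, List.map_cons, htrip]
      simp
    · rw [if_neg (fun hc => hab (hA.mp hc))]
      have hgF : abaGood s ((x : Int)) = false := by rw [hgood]; exact decide_eq_false hab
      rw [hgF, if_neg (by simp)]
  · rw [abaLoopA, dif_neg (by omega), pyRange_one_nil (by omega)]
    simp
termination_by s.length - x
decreasing_by omega

-- ===== B-side characterization =====

-- the positions recorded for character ch, as a filter of the index range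
theorem abaIndex_getD (cs : List Char) (ch : Char) :
    (abaIndex cs).getD ch [] =
      (PySem.List.pyRange 0 ((cs.length : Int))).filter
        (fun j => PySem.List.pyGetD cs j ' ' == ch) := by
  unfold abaIndex
  have h1 : (PySem.List.enumerate cs).foldl
      (fun d p => d.modify p.2 [] (fun l => l ++ [p.1])) PySem.Dict.empty =
      ((PySem.List.enumerate cs).map Prod.swap).foldl
      (fun d p => d.modify p.1 [] (fun l => l ++ [p.2])) PySem.Dict.empty := by
    rw [List.foldl_map]
    rfl
  rw [h1, PySem.Dict.getD_foldl_modify_append, PySem.Dict.getD_empty]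
  rw [PySem.List.enumerate_eq_map_pyRange cs ' ']
  simp only [List.map_map, List.filter_map, Function.comp_def, Prod.swap_prod_mk]
  simp [PySem.List.len]

theorem abaIndex_keys (cs : List Char) :
    (abaIndex cs).keys = PySem.Set.ofList cs := by
  unfold abaIndex
  rw [show (fun (d : PySem.Dict Char (List Int)) (p : Int × Char) =>
        d.modify p.2 [] (fun l => l ++ [p.1])) =
      (fun d p => d.modify ((fun (q : Int × Char) => q.2) p) []
        ((fun (_ : PySem.Dict Char (List Int)) (q : Int × Char) (l : List Int) => l ++ [q.1]) d p))
    from rfl]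
  rw [PySem.Dict.keys_foldl_modify_key, PySem.Dict.keys_empty,
    PySem.List.map_snd_enumerate]
  rfl

-- per character class, the collected starts are the ABA starts of that class
theorem class_filter_eq (cs : List Char) (ch : Char) :
    ((PySem.List.pyRange 0 ((cs.length : Int))).filter
        (fun j => PySem.List.pyGetD cs j ' ' == ch)).filter
      (fun i =>
        (PySem.Set.ofList ((PySem.List.pyRange 0 ((cs.length : Int))).filter
          (fun j => PySem.List.pyGetD cs j ' ' == ch))).contains (i + 2) &&
        (PySem.List.pyGetD cs (i + 1) ' ' != ch)) =
    (abaWin cs).filter (fun j => PySem.List.pyGetD cs j ' ' == ch) := by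
  unfold abaWin
  rw [List.filter_filter, List.filter_filter]
  apply List.filter_congr
  intro i hi
  rw [PySem.List.mem_pyRange_one] at hi
  have hmem : ∀ m : Int,
      ((PySem.Set.ofList ((PySem.List.pyRange 0 ((cs.length : Int))).filter
        (fun j => PySem.List.pyGetD cs j ' ' == ch))).contains m = true) ↔
      (0 ≤ m ∧ m < (cs.length : Int) ∧ PySem.List.pyGetD cs m ' ' = ch) := by
    intro m
    rw [PySem.Set.contains_iff, PySem.Set.mem_ofList, List.mem_filter,
      PySem.List.mem_pyRange_one]
    simp [and_assoc]
  by_cases hc : PySem.List.pyGetD cs i ' ' = ch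
  · by_cases h2 : (0 ≤ i + 2 ∧ i + 2 < (cs.length : Int) ∧ PySem.List.pyGetD cs (i + 2) ' ' = ch)
    · have hset : (PySem.Set.ofList ((PySem.List.pyRange 0 ((cs.length : Int))).filter
          (fun j => PySem.List.pyGetD cs j ' ' == ch))).contains (i + 2) = true := (hmem (i + 2)).mpr h2
      simp only [hset, Bool.true_and, abaGood, hc, h2.2.2]
      by_cases hb : PySem.List.pyGetD cs (i + 1) ' ' = ch
      · simp [hb, show i < (cs.length : Int) - 2 by omega]
      · have hb' : ¬ ch = PySem.List.pyGetD cs (i + 1) ' ' := fun he => hb he.symm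
        simp [hb, hb', show i < (cs.length : Int) - 2 by omega]
    · have hset : (PySem.Set.ofList ((PySem.List.pyRange 0 ((cs.length : Int))).filter
          (fun j => PySem.List.pyGetD cs j ' ' == ch))).contains (i + 2) = false := by
        rw [← Bool.not_eq_true, hmem (i + 2)]; exact h2
      simp only [hset, Bool.false_and, abaGood, hc]
      by_cases hw : i < (cs.length : Int) - 2
      · have : ¬ PySem.List.pyGetD cs (i + 2) ' ' = ch := by
          intro he; exact h2 ⟨by omega, by omega, he⟩
        have this' : ¬ ch = PySem.List.pyGetD cs (i + 2) ' ' := fun he => this he.symm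
        simp [this', hw]
      · simp [hw]
  · have hf : (PySem.List.pyGetD cs i ' ' == ch) = false := by simp [hc]
    simp [hf]

theorem abaStarts_eq (cs : List Char) :
    abaStarts cs = (PySem.Set.ofList cs).flatMap
      (fun ch => (abaWin cs).filter (fun j => PySem.List.pyGetD cs j ' ' == ch)) := by
  unfold abaStarts
  have hnd : (abaIndex cs).keys.Nodup := by
    rw [abaIndex_keys]; exact PySem.Set.nodup_ofList cs
  rw [PySem.Dict.items_eq_map_keys (abaIndex cs) hnd []]
  have hinner : ∀ (p : Char × List Int) (acc : List Int),
      p.2.foldl (fun acc i =>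
        if (PySem.Set.ofList p.2).contains (i + 2) &&
           (PySem.List.pyGetD cs (i + 1) ' ' != p.1)
        then acc ++ [i] else acc) acc =
      acc ++ (p.2.filter (fun i =>
        (PySem.Set.ofList p.2).contains (i + 2) &&
        (PySem.List.pyGetD cs (i + 1) ' ' != p.1))).map id := by
    intro p acc
    exact PySem.List.foldl_append_if _ id p.2 acc
  simp only [hinner, List.map_id]
  rw [List.foldl_map,
    show (fun (acc : List Int) (k : Char) =>
        acc ++ (((abaIndex cs).getD k []).filter (fun i =>
          (PySem.Set.ofList ((abaIndex cs).getD k [])).contains (i + 2) &&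
          (PySem.List.pyGetD cs (i + 1) ' ' != k)))) =
      (fun acc k => acc ++ ((abaWin cs).filter
        (fun j => PySem.List.pyGetD cs j ' ' == k))) from by
      funext acc k
      rw [abaIndex_getD, class_filter_eq]]
  rw [PySem.List.foldl_append_eq_flatMap, abaIndex_keys]
  rfl

theorem abaWin_pairwise (cs : List Char) : (abaWin cs).Pairwise (· < ·) :=
  (pyRange_one_pairwise 0 ((cs.length : Int))).filter _

theorem sorted_abaStarts (cs : List Char) :
    PySem.List.sorted (abaStarts cs) (fun x => x) = abaWin cs := by
  apply PySem.List.sorted_eq_of_perm_of_pairwise_lt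
  · rw [abaStarts_eq]
    refine (perm_flatMap_classes (PySem.Set.ofList cs) (abaWin cs)
      (fun i => PySem.List.pyGetD cs i ' ') (PySem.Set.nodup_ofList cs) ?_).symm
    intro i hi
    unfold abaWin at hi
    rw [List.mem_filter, PySem.List.mem_pyRange_one] at hi
    rw [PySem.Set.mem_ofList]
    obtain ⟨⟨h0, hlen⟩, _⟩ := hi
    have hn : i = ((i.toNat : Nat) : Int) := by omega
    have hlt : i.toNat < cs.length := by omega
    show PySem.List.pyGetD cs i ' ' ∈ cs
    rw [hn, PySem.List.pyGetD_natCast, List.getD_eq_getElem cs ' ' hlt]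
    exact List.getElem_mem hlt
  · exact abaWin_pairwise cs

-- link A's range of window starts to the filtered full range used on the B side
theorem abaWin_eq_filter (cs : List Char) :
    (PySem.List.pyRange 0 ((cs.length : Int) - 2)).filter (abaGood cs) = abaWin cs := by
  rw [pyRange_filter_lt 0 ((cs.length : Int) - 2) ((cs.length : Int)) (by omega),
    List.filter_filter]
  apply List.filter_congr
  intro i _
  exact Bool.and_comm _ _

theorem perString_eq (s : String) (acc : List String) :
    abaLoopA s.toList 0 acc =
      acc ++ (PySem.List.sorted (abaStarts s.toList) (fun x => x)).map
        (fun i => String.ofList (PySem.List.slice s.toList (some i) (some (i + 3)))) := by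
  have h := abaLoopA_eq s.toList 0 acc
  simp only [Nat.cast_zero] at h
  rw [h, abaWin_eq_filter, sorted_abaStarts]
  rfl

-- ===== VERDICT (by name: the statement is the Claim_ definition above) =====
theorem abaTest_spec : Claim_equal_abaTest := by
  intro to_test _
  show abaTest to_test = abaTest_alt to_test
  unfold abaTest abaTest_alt
  rw [PySem.List.foldl_pyRange_zero_pyGetD' to_test ""
    (fun acc s => abaLoopA s.toList 0 acc) []]
  have hf : (fun (acc : List String) (s : String) => abaLoopA s.toList 0 acc)
      = fun acc s =>
        acc ++ (PySem.List.sorted (abaStarts s.toList) (fun x => x)).map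
          (fun i => String.ofList (PySem.List.slice s.toList (some i) (some (i + 3)))) := by
    funext acc s
    exact perString_eq s acc
  rw [hf]
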